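-- pv_equiv track=rewrite | github.com/winkydang/DailyProject | test_LC/LC1109-航班预订统计-差分数组.py | corpFlightBookings
-- ===== SOURCE A (Python) =====
-- from typing import List
--
-- def corpFlightBookings(bookings: List[List[int]], n: int) -> List[int]:
--     # 定义差分数组，元素初始化为0
--     diff = [0] * n
--
--     for left, right, inc in bookings:
--         diff[left - 1] += inc
--
--         if right - 1 + 1 < n:
--             diff[right - 1 + 1] -= inc
--
--     # 对差分数组求前缀和即可得到原数组
--     for i in range(1, n):
--         diff[i] = diff[i] + diff[i - 1]
--
--     return diff
-- ===== SOURCE B (Python) =====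
-- from typing import List
--
-- def corpFlightBookings(bookings: List[List[int]], n: int) -> List[int]:
--     result = [0] * n
--     for left, right, inc in bookings:
--         result[left - 1:] = [x + inc for x in result[left - 1:]]
--         result[right:] = [x - inc for x in result[right:]]
--     return result
-- ===== Notes on version B (the rewrite author's own statement) =====
-- stated objective: alternative
-- what changed: B drops the difference array and the prefix-sum pass: each booking adds its increment to the whole seat suffix from left-1 and subtracts it from the suffix from right, so the result is built by direct suffix updates instead of edge markers plus a running sum.
import Mathlib
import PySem

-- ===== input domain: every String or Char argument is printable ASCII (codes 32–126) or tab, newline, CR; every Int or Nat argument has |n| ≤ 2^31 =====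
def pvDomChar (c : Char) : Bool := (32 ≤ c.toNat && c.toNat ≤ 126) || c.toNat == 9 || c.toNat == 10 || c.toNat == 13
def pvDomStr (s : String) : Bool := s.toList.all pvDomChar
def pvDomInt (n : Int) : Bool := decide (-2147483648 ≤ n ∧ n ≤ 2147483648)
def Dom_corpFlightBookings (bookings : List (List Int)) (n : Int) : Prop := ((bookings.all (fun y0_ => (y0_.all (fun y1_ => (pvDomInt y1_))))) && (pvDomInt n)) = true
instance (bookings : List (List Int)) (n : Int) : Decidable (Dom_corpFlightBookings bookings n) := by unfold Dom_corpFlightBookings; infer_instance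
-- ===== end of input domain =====

-- B drops the difference array and the prefix-sum pass: each booking adds its
-- increment to the whole seat suffix from left-1 and removes it from the suffix
-- from right (an alternative formulation of the same counts).

-- ===== PORT A =====
def corpFlightBookings (bookings : List (List Int)) (n : Int) : List Int :=
  let diff := List.replicate n.toNat (0 : Int)
  let diff := bookings.foldl (fun diff b =>
    match b with
    | [left, right, inc] =>
      let diff := PySem.List.pySetD diff (left - 1) (PySem.List.pyGetD diff (left - 1) 0 + inc)
      if right - 1 + 1 < n then
        PySem.List.pySetD diff (right - 1 + 1) (PySem.List.pyGetD diff (right - 1 + 1) 0 - inc)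
      else diff
    | _ => diff) diff
  (PySem.List.pyRange 1 n).foldl (fun diff i =>
    PySem.List.pySetD diff i (PySem.List.pyGetD diff i 0 + PySem.List.pyGetD diff (i - 1) 0)) diff

-- ===== PORT B =====
-- row unpacking 'for left, right, inc in bookings' is rendered through pyGetD (exact on the
-- length-3 rows Pre_ admits; Python raises ValueError on other rows); the Python slice
-- assignments 'result[a:] = [... for x in result[a:]]' are rendered as prefix ++ mapped suffix,
-- exact for any a ≥ -len (Python slices clamp).
def corpFlightBookings_alt (bookings : List (List Int)) (n : Int) : List Int :=
  let result := List.replicate n.toNat (0 : Int)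
  bookings.foldl (fun result b =>
    let result := PySem.List.slice result none (some (PySem.List.pyGetD b 0 0 - 1)) ++
      (PySem.List.slice result (some (PySem.List.pyGetD b 0 0 - 1)) none).map
        (fun x => x + PySem.List.pyGetD b 2 0)
    PySem.List.slice result none (some (PySem.List.pyGetD b 1 0)) ++
      (PySem.List.slice result (some (PySem.List.pyGetD b 1 0)) none).map
        (fun x => x - PySem.List.pyGetD b 2 0)) result

-- ===== PRECONDITION & SPEC =====
-- Pre_ is exactly the closed-form description of the inputs on which the Python A returns
-- normally: every row has three entries (otherwise unpacking raises ValueError) and its two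
-- seat indices stay inside Python's accepted index range for the length-n array
-- (1-n ≤ left ≤ n and -n ≤ right; otherwise A raises IndexError).
def Pre_corpFlightBookings (bookings : List (List Int)) (n : Int) : Prop :=
  ∀ b ∈ bookings, b.length = 3 ∧ 1 - n ≤ PySem.List.pyGetD b 0 0 ∧
    PySem.List.pyGetD b 0 0 ≤ n ∧ -n ≤ PySem.List.pyGetD b 1 0
instance (bookings : List (List Int)) (n : Int) : Decidable (Pre_corpFlightBookings bookings n) := by
  unfold Pre_corpFlightBookings; infer_instance

def pvWitness_corpFlightBookings : List (List Int) × Int := ([[1, 2, 10], [2, 3, 5]], 3)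

def Spec_corpFlightBookings (bookings : List (List Int)) (n : Int) (out : List Int) : Prop := out = corpFlightBookings_alt bookings n
instance (bookings : List (List Int)) (n : Int) (out : List Int) : Decidable (Spec_corpFlightBookings bookings n out) := by unfold Spec_corpFlightBookings; infer_instance

-- ===== CLAIM (what is proved, stated in full; the proofs are below) =====
def Claim_equal_corpFlightBookings : Prop := ∀ (bookings : List (List Int)) (n : Int), Dom_corpFlightBookings bookings n → Pre_corpFlightBookings bookings n → Spec_corpFlightBookings bookings n (corpFlightBookings bookings n)

-- ===== LEMMAS AND PROOFS =====

-- Python's index normalisation for a length-n array: negative indices count from the end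
def pvNorm (n t : Int) : Int := if t < 0 then t + n else t

-- contribution of one booking row to seat j (suffix view)
def pvContrib (b : List Int) (n : Int) (j : Nat) : Int :=
  (if pvNorm n (PySem.List.pyGetD b 0 0 - 1) ≤ (j : Int) then PySem.List.pyGetD b 2 0 else 0) -
  (if pvNorm n (PySem.List.pyGetD b 1 0) ≤ (j : Int) then PySem.List.pyGetD b 2 0 else 0)

-- difference-array increment of one booking row at position j
def pvDelta (b : List Int) (n : Int) (j : Nat) : Int :=
  (if (j : Int) = pvNorm n (PySem.List.pyGetD b 0 0 - 1) then PySem.List.pyGetD b 2 0 else 0) -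
  (if PySem.List.pyGetD b 1 0 < n ∧ (j : Int) = pvNorm n (PySem.List.pyGetD b 1 0) then PySem.List.pyGetD b 2 0 else 0)

def pvSumC (bookings : List (List Int)) (n : Int) (j : Nat) : Int := (bookings.map (fun b => pvContrib b n j)).sum
def pvSumD (bookings : List (List Int)) (n : Int) (j : Nat) : Int := (bookings.map (fun b => pvDelta b n j)).sum

lemma pvGetD_replicate (m j : Nat) : PySem.List.pyGetD (List.replicate m (0 : Int)) (j : Int) 0 = 0 := by
  rw [PySem.List.pyGetD_natCast]; simp [List.getD]

lemma pvWrapSet (xs : List Int) (i : Int) (v : Int) (h0 : -(xs.length : Int) ≤ i) (h1 : i < 0) :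
    PySem.List.pySetD xs i v = PySem.List.pySetD xs (i + xs.length) v := by
  have hk : xs.length - (-i).toNat = (i + xs.length).toNat := by omega
  simp only [PySem.List.pySetD, PySem.List.pySet?, PySem.List.pyIdx?,
    if_neg (show ¬ 0 ≤ i by omega), if_pos h0,
    if_pos (show 0 ≤ i + (xs.length : Int) by omega),
    if_pos (show i + (xs.length : Int) < (xs.length : Int) by omega), hk]

lemma pvWrapGet (xs : List Int) (i : Int) (d : Int) (h0 : -(xs.length : Int) ≤ i) (h1 : i < 0) :
    PySem.List.pyGetD xs i d = PySem.List.pyGetD xs (i + xs.length) d := by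
  have hk : xs.length - (-i).toNat = (i + xs.length).toNat := by omega
  simp only [PySem.List.pyGetD, PySem.List.pyGet?, PySem.List.pyIdx?,
    if_neg (show ¬ 0 ≤ i by omega), if_pos h0,
    if_pos (show 0 ≤ i + (xs.length : Int) by omega),
    if_pos (show i + (xs.length : Int) < (xs.length : Int) by omega), hk]

lemma pvWrapSetN (xs : List Int) (n i v : Int) (hlen : (xs.length : Int) = n)
    (h0 : -n ≤ i) (h1 : i < n) : PySem.List.pySetD xs i v = PySem.List.pySetD xs (pvNorm n i) v := by
  by_cases h : i < 0
  · rw [pvWrapSet xs i v (by omega) h]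
    simp only [pvNorm, if_pos h, hlen]
  · simp only [pvNorm, if_neg h]

lemma pvWrapGetN (xs : List Int) (n i d : Int) (hlen : (xs.length : Int) = n)
    (h0 : -n ≤ i) (h1 : i < n) : PySem.List.pyGetD xs i d = PySem.List.pyGetD xs (pvNorm n i) d := by
  by_cases h : i < 0
  · rw [pvWrapGet xs i d (by omega) h]
    simp only [pvNorm, if_pos h, hlen]
  · simp only [pvNorm, if_neg h]

lemma pvSliceTo (xs : List Int) (t : Int) (h0 : -(xs.length : Int) ≤ t) :
    PySem.List.slice xs none (some t) = xs.take (pvNorm xs.length t).toNat := by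
  by_cases h : t < 0
  · have hk : t = -(((-t).toNat : Nat) : Int) := by omega
    rw [hk, PySem.List.slice_to_neg_natCast _ _ (by omega)]
    simp only [pvNorm, if_pos (show -(((-t).toNat : Nat) : Int) < 0 by omega)]
    congr 1; omega
  · rw [PySem.List.slice_to _ (by omega)]
    simp only [pvNorm, if_neg h]

lemma pvSliceFrom (xs : List Int) (t : Int) (h0 : -(xs.length : Int) ≤ t) :
    PySem.List.slice xs (some t) none = xs.drop (pvNorm xs.length t).toNat := by
  by_cases h : t < 0
  · have hk : t = -(((-t).toNat : Nat) : Int) := by omega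
    rw [hk, PySem.List.slice_from_neg_natCast _ _ (by omega)]
    simp only [pvNorm, if_pos (show -(((-t).toNat : Nat) : Int) < 0 by omega)]
    congr 1; omega
  · rw [PySem.List.slice_from _ (by omega)]
    simp only [pvNorm, if_neg h]

-- one Python suffix assignment result[t:] = [x + d for x in result[t:]]
lemma pvSuffix (res : List Int) (t d : Int) (h0 : -(res.length : Int) ≤ t) :
    ((PySem.List.slice res none (some t) ++ (PySem.List.slice res (some t) none).map (fun x => x + d)).length = res.length) ∧
    ∀ j : Nat, j < res.length →
      PySem.List.pyGetD (PySem.List.slice res none (some t) ++ (PySem.List.slice res (some t) none).map (fun x => x + d)) (j : Int) 0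
        = PySem.List.pyGetD res (j : Int) 0 + (if pvNorm (res.length) t ≤ (j : Int) then d else 0) := by
  rw [pvSliceTo res t h0, pvSliceFrom res t h0]
  have hP0 : 0 ≤ pvNorm (res.length) t := by simp only [pvNorm]; split_ifs <;> omega
  generalize hP : pvNorm (res.length : Int) t = P at *
  have hlen : (res.take P.toNat ++ (res.drop P.toNat).map (fun x => x + d)).length = res.length := by
    simp only [List.length_append, List.length_take, List.length_drop, List.length_map]
    omega
  refine ⟨hlen, ?_⟩
  intro j hj
  rw [PySem.List.pyGetD_natCast, PySem.List.pyGetD_natCast,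
    List.getD_eq_getElem _ _ (by rw [hlen]; exact hj), List.getD_eq_getElem _ _ hj]
  by_cases hjm : j < P.toNat
  · rw [if_neg (by omega)]
    rw [List.getElem_append_left (by simp only [List.length_take]; omega)]
    simp [List.getElem_take]
  · rw [if_pos (by omega)]
    rw [List.getElem_append_right (by simp only [List.length_take]; omega)]
    simp only [List.getElem_map, List.getElem_drop]
    congr 2
    simp only [List.length_take]
    omega

lemma pvGetSet (xs : List Int) (i j v : Int) (hi0 : 0 ≤ i) (hi : i < (xs.length : Int)) (hj0 : 0 ≤ j) :
    PySem.List.pyGetD (PySem.List.pySetD xs i v) j 0 = if j = i then v else PySem.List.pyGetD xs j 0 := by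
  have hi' : i = ((i.toNat : Nat) : Int) := (Int.toNat_of_nonneg hi0).symm
  have hj' : j = ((j.toNat : Nat) : Int) := (Int.toNat_of_nonneg hj0).symm
  rw [hi', hj', PySem.List.pyGetD_pySetD_natCast xs i.toNat j.toNat _ _ (by omega)]
  by_cases h : j.toNat = i.toNat
  · rw [if_pos h, if_pos (by omega)]
  · rw [if_neg h, if_neg (by omega)]

-- B's loop over the bookings
set_option maxHeartbeats 1000000 in
lemma pvB_outer : ∀ (bookings : List (List Int)) (res : List Int) (n : Int),
    (res.length : Int) = n →
    (∀ b ∈ bookings, b.length = 3 ∧ 1 - n ≤ PySem.List.pyGetD b 0 0 ∧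
      PySem.List.pyGetD b 0 0 ≤ n ∧ -n ≤ PySem.List.pyGetD b 1 0) →
    ((bookings.foldl (fun result b =>
      PySem.List.slice (PySem.List.slice result none (some (PySem.List.pyGetD b 0 0 - 1)) ++
          (PySem.List.slice result (some (PySem.List.pyGetD b 0 0 - 1)) none).map
            (fun x => x + PySem.List.pyGetD b 2 0)) none (some (PySem.List.pyGetD b 1 0)) ++
        (PySem.List.slice (PySem.List.slice result none (some (PySem.List.pyGetD b 0 0 - 1)) ++
          (PySem.List.slice result (some (PySem.List.pyGetD b 0 0 - 1)) none).map
            (fun x => x + PySem.List.pyGetD b 2 0)) (some (PySem.List.pyGetD b 1 0)) none).map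
          (fun x => x - PySem.List.pyGetD b 2 0)) res).length = res.length) ∧
    ∀ j : Nat, j < res.length → PySem.List.pyGetD (bookings.foldl (fun result b =>
      PySem.List.slice (PySem.List.slice result none (some (PySem.List.pyGetD b 0 0 - 1)) ++
          (PySem.List.slice result (some (PySem.List.pyGetD b 0 0 - 1)) none).map
            (fun x => x + PySem.List.pyGetD b 2 0)) none (some (PySem.List.pyGetD b 1 0)) ++
        (PySem.List.slice (PySem.List.slice result none (some (PySem.List.pyGetD b 0 0 - 1)) ++
          (PySem.List.slice result (some (PySem.List.pyGetD b 0 0 - 1)) none).map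
            (fun x => x + PySem.List.pyGetD b 2 0)) (some (PySem.List.pyGetD b 1 0)) none).map
          (fun x => x - PySem.List.pyGetD b 2 0)) res) (j : Int) 0
      = PySem.List.pyGetD res (j : Int) 0 + pvSumC bookings n j := by
  intro bookings
  induction bookings with
  | nil =>
    intro res n hlen hb
    exact ⟨rfl, fun j hj => by simp [pvSumC]⟩
  | cons b bs ih =>
    intro res n hlen hb
    obtain ⟨hb3, hbl1, hbl2, hbr⟩ := hb b (List.mem_cons_self ..)
    match b, hb3 with
    | [l, r, c], _ =>
      have e0 : PySem.List.pyGetD [l, r, c] 0 0 = l := by simp [pysem]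
      have e1 : PySem.List.pyGetD [l, r, c] 1 0 = r := by simp [pysem]
      have e2 : PySem.List.pyGetD [l, r, c] 2 0 = c := by simp [pysem]
      rw [e0] at hbl1 hbl2
      rw [e1] at hbr
      have hsub : (fun x : Int => x - c) = (fun x : Int => x + (-c)) := by
        funext x; ring
      rw [List.foldl_cons]
      simp only [e0, e1, e2, hsub]
      obtain ⟨hL1, hP1⟩ := pvSuffix res (l - 1) c (by omega)
      obtain ⟨hL2, hP2⟩ := pvSuffix (PySem.List.slice res none (some (l - 1)) ++
        (PySem.List.slice res (some (l - 1)) none).map (fun x => x + c)) r (-c) (by rw [hL1]; omega)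
      obtain ⟨hL3, hP3⟩ := ih _ n (by rw [hL2, hL1]; exact hlen)
        (fun b hbm => hb b (List.mem_cons_of_mem _ hbm))
      refine ⟨by rw [hL3, hL2, hL1], ?_⟩
      intro j hj
      rw [hP3 j (by rw [hL2, hL1]; exact hj), hP2 j (by rw [hL1]; exact hj), hP1 j hj,
        hL1, hlen]
      simp only [pvSumC, List.map_cons, List.sum_cons, pvContrib, e0, e1, e2]
      have hneg : (if pvNorm n r ≤ (j : Int) then -c else 0) = -(if pvNorm n r ≤ (j : Int) then c else 0) := by
        split_ifs <;> ring
      rw [hneg]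
      ring

-- A's first loop, one booking step
set_option maxHeartbeats 1000000 in
lemma pvA_step (l r c n : Int) (diff : List Int) (hl1 : 1 - n ≤ l) (hl2 : l ≤ n) (hr : -n ≤ r)
    (hlen : (diff.length : Int) = n) :
    ((if r - 1 + 1 < n then
        PySem.List.pySetD (PySem.List.pySetD diff (l - 1) (PySem.List.pyGetD diff (l - 1) 0 + c)) (r - 1 + 1)
          (PySem.List.pyGetD (PySem.List.pySetD diff (l - 1) (PySem.List.pyGetD diff (l - 1) 0 + c)) (r - 1 + 1) 0 - c)
      else PySem.List.pySetD diff (l - 1) (PySem.List.pyGetD diff (l - 1) 0 + c)).length = diff.length) ∧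
    ∀ j : Nat, j < diff.length →
      PySem.List.pyGetD (if r - 1 + 1 < n then
        PySem.List.pySetD (PySem.List.pySetD diff (l - 1) (PySem.List.pyGetD diff (l - 1) 0 + c)) (r - 1 + 1)
          (PySem.List.pyGetD (PySem.List.pySetD diff (l - 1) (PySem.List.pyGetD diff (l - 1) 0 + c)) (r - 1 + 1) 0 - c)
      else PySem.List.pySetD diff (l - 1) (PySem.List.pyGetD diff (l - 1) 0 + c)) (j : Int) 0
      = PySem.List.pyGetD diff (j : Int) 0 +
        ((if (j : Int) = pvNorm n (l - 1) then c else 0) - (if r < n ∧ (j : Int) = pvNorm n r then c else 0)) := by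
  have hr1 : r - 1 + 1 = r := by ring
  rw [hr1]
  have hP1a : 0 ≤ pvNorm n (l - 1) := by simp only [pvNorm]; split_ifs <;> omega
  have hP1b : pvNorm n (l - 1) < n := by simp only [pvNorm]; split_ifs <;> omega
  rw [pvWrapGetN diff n (l - 1) 0 hlen (by omega) (by omega),
    pvWrapSetN diff n (l - 1) _ hlen (by omega) (by omega)]
  have hlen1 : (PySem.List.pySetD diff (pvNorm n (l - 1)) (PySem.List.pyGetD diff (pvNorm n (l - 1)) 0 + c)).length = diff.length :=
    PySem.List.length_pySetD _ _ _
  by_cases hg : r < n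
  · have hP2a : 0 ≤ pvNorm n r := by simp only [pvNorm]; split_ifs <;> omega
    have hP2b : pvNorm n r < n := by simp only [pvNorm]; split_ifs <;> omega
    rw [if_pos hg,
      pvWrapGetN _ n r 0 (by rw [hlen1]; exact hlen) (by omega) (by omega),
      pvWrapSetN _ n r _ (by rw [hlen1]; exact hlen) (by omega) (by omega)]
    refine ⟨by rw [PySem.List.length_pySetD, hlen1], ?_⟩
    intro j hj
    rw [pvGetSet _ (pvNorm n r) (j : Int) _ hP2a (by rw [hlen1]; omega) (by omega),
      pvGetSet diff (pvNorm n (l - 1)) (pvNorm n r) _ hP1a (by omega) hP2a,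
      pvGetSet diff (pvNorm n (l - 1)) (j : Int) _ hP1a (by omega) (by omega)]
    have hgand : ((r < n ∧ (j : Int) = pvNorm n r) ↔ ((j : Int) = pvNorm n r)) := by
      constructor
      · exact fun h => h.2
      · exact fun h => ⟨hg, h⟩
    simp only [hgand]
    by_cases hj2 : (j : Int) = pvNorm n r
    · rw [if_pos hj2, hj2]
      by_cases hq : pvNorm n r = pvNorm n (l - 1)
      · rw [if_pos hq, hq]
        ring
      · rw [if_neg hq, if_neg hq, if_pos rfl]
        ring
    · rw [if_neg hj2]
      by_cases hj1 : (j : Int) = pvNorm n (l - 1)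
      · rw [if_pos hj1, hj1, if_pos rfl, if_neg (show ¬ pvNorm n (l - 1) = pvNorm n r by omega)]
        ring
      · rw [if_neg hj1, if_neg hj1, if_neg hj2]
        ring
  · rw [if_neg hg]
    refine ⟨hlen1, ?_⟩
    intro j hj
    rw [pvGetSet diff (pvNorm n (l - 1)) (j : Int) _ hP1a (by omega) (by omega),
      if_neg (show ¬ (r < n ∧ (j : Int) = pvNorm n r) from fun h => hg h.1)]
    by_cases hj1 : (j : Int) = pvNorm n (l - 1)
    · rw [if_pos hj1, hj1, if_pos rfl]
      ring
    · rw [if_neg hj1, if_neg hj1]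
      ring

-- A's first loop over the bookings
set_option maxHeartbeats 1000000 in
lemma pvA_phase1 : ∀ (bookings : List (List Int)) (diff : List Int) (n : Int),
    (diff.length : Int) = n →
    (∀ b ∈ bookings, b.length = 3 ∧ 1 - n ≤ PySem.List.pyGetD b 0 0 ∧
      PySem.List.pyGetD b 0 0 ≤ n ∧ -n ≤ PySem.List.pyGetD b 1 0) →
    ((bookings.foldl (fun diff b =>
      match b with
      | [left, right, inc] =>
        let diff := PySem.List.pySetD diff (left - 1) (PySem.List.pyGetD diff (left - 1) 0 + inc)
        if right - 1 + 1 < n then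
          PySem.List.pySetD diff (right - 1 + 1) (PySem.List.pyGetD diff (right - 1 + 1) 0 - inc)
        else diff
      | _ => diff) diff).length = diff.length) ∧
    ∀ j : Nat, j < diff.length → PySem.List.pyGetD (bookings.foldl (fun diff b =>
      match b with
      | [left, right, inc] =>
        let diff := PySem.List.pySetD diff (left - 1) (PySem.List.pyGetD diff (left - 1) 0 + inc)
        if right - 1 + 1 < n then
          PySem.List.pySetD diff (right - 1 + 1) (PySem.List.pyGetD diff (right - 1 + 1) 0 - inc)
        else diff
      | _ => diff) diff) (j : Int) 0 = PySem.List.pyGetD diff (j : Int) 0 + pvSumD bookings n j := by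
  intro bookings
  induction bookings with
  | nil =>
    intro diff n hlen hb
    exact ⟨rfl, fun j hj => by simp [pvSumD]⟩
  | cons b bs ih =>
    intro diff n hlen hb
    obtain ⟨hb3, hbl1, hbl2, hbr⟩ := hb b (List.mem_cons_self ..)
    match b, hb3 with
    | [l, r, c], _ =>
      have e0 : PySem.List.pyGetD [l, r, c] 0 0 = l := by simp [pysem]
      have e1 : PySem.List.pyGetD [l, r, c] 1 0 = r := by simp [pysem]
      have e2 : PySem.List.pyGetD [l, r, c] 2 0 = c := by simp [pysem]
      rw [e0] at hbl1 hbl2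
      rw [e1] at hbr
      rw [List.foldl_cons]
      obtain ⟨hL1, hP1⟩ := pvA_step l r c n diff hbl1 hbl2 hbr hlen
      obtain ⟨hL2, hP2⟩ := ih _ n (by rw [hL1]; exact hlen)
        (fun b hbm => hb b (List.mem_cons_of_mem _ hbm))
      refine ⟨by rw [hL2, hL1], ?_⟩
      intro j hj
      rw [hP2 j (by rw [hL1]; exact hj), hP1 j hj]
      simp only [pvSumD, List.map_cons, List.sum_cons, pvDelta, e0, e1, e2]
      ring

-- A's prefix-sum loop
lemma pvA_phase2 (f : Nat → Int) : ∀ (k : Nat) (a n : Int) (w : List Int), (n - a).toNat = k → 1 ≤ a →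
    (w.length : Int) = n →
    (∀ j : Nat, (j : Int) < a → PySem.List.pyGetD w (j : Int) 0 = ∑ i ∈ Finset.range (j + 1), f i) →
    (∀ j : Nat, a ≤ (j : Int) → j < w.length → PySem.List.pyGetD w (j : Int) 0 = f j) →
    (((PySem.List.pyRange a n).foldl (fun w i =>
        PySem.List.pySetD w i (PySem.List.pyGetD w i 0 + PySem.List.pyGetD w (i - 1) 0)) w).length = w.length) ∧
    ∀ j : Nat, j < w.length → PySem.List.pyGetD ((PySem.List.pyRange a n).foldl (fun w i =>
        PySem.List.pySetD w i (PySem.List.pyGetD w i 0 + PySem.List.pyGetD w (i - 1) 0)) w) (j : Int) 0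
      = if (j : Int) < a ∨ (j : Int) < n then ∑ i ∈ Finset.range (j + 1), f i else f j := by
  intro k
  induction k with
  | zero =>
    intro a n w hk ha hlen h1 h2
    rw [PySem.List.pyRange_one_eq_nil (by omega), List.foldl_nil]
    refine ⟨rfl, ?_⟩
    intro j hj
    by_cases hja : (j : Int) < a
    · rw [if_pos (Or.inl hja)]
      exact h1 j hja
    · rw [if_neg (by omega)]
      exact h2 j (by omega) hj
  | succ k ih =>
    intro a n w hk ha hlen h1 h2
    have han : a < n := by omega
    rw [PySem.List.pyRange_one_cons han, List.foldl_cons]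
    have hlen1 : (PySem.List.pySetD w a (PySem.List.pyGetD w a 0 + PySem.List.pyGetD w (a - 1) 0)).length = w.length :=
      PySem.List.length_pySetD _ _ _
    have hget : ∀ jj : Nat, PySem.List.pyGetD (PySem.List.pySetD w a (PySem.List.pyGetD w a 0 + PySem.List.pyGetD w (a - 1) 0)) (jj : Int) 0
        = if (jj : Int) = a then PySem.List.pyGetD w a 0 + PySem.List.pyGetD w (a - 1) 0 else PySem.List.pyGetD w (jj : Int) 0 :=
      fun jj => pvGetSet w a (jj : Int) _ (by omega) (by omega) (by omega)
    have h1' : ∀ j : Nat, (j : Int) < a + 1 →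
        PySem.List.pyGetD (PySem.List.pySetD w a (PySem.List.pyGetD w a 0 + PySem.List.pyGetD w (a - 1) 0)) (j : Int) 0
          = ∑ i ∈ Finset.range (j + 1), f i := by
      intro j hj
      rw [hget j]
      by_cases hja : (j : Int) = a
      · rw [if_pos hja]
        have e1 : PySem.List.pyGetD w a 0 = f j := by
          rw [← hja]
          exact h2 j (by omega) (by omega)
        have e2 : PySem.List.pyGetD w (a - 1) 0 = ∑ i ∈ Finset.range j, f i := by
          have hj1 : a - 1 = (((j - 1 : Nat) : Nat) : Int) := by omega
          have hjj : j - 1 + 1 = j := by omega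
          rw [hj1, h1 (j - 1) (by omega), hjj]
        rw [e1, e2, Finset.sum_range_succ]
        ring
      · rw [if_neg hja]
        exact h1 j (by omega)
    have h2' : ∀ j : Nat, a + 1 ≤ (j : Int) →
        j < (PySem.List.pySetD w a (PySem.List.pyGetD w a 0 + PySem.List.pyGetD w (a - 1) 0)).length →
        PySem.List.pyGetD (PySem.List.pySetD w a (PySem.List.pyGetD w a 0 + PySem.List.pyGetD w (a - 1) 0)) (j : Int) 0 = f j := by
      intro j hj hjl
      rw [hget j, if_neg (by omega)]
      exact h2 j (by omega) (by rw [← hlen1]; exact hjl)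
    obtain ⟨hL, hP⟩ := ih (a + 1) n _ (by omega) (by omega) (by rw [hlen1]; exact hlen) h1' h2'
    refine ⟨by rw [hL, hlen1], ?_⟩
    intro j hj
    rw [hP j (by rw [hlen1]; exact hj)]
    by_cases hcond : (j : Int) < a + 1 ∨ (j : Int) < n
    · rw [if_pos hcond, if_pos (by omega)]
    · rw [if_neg hcond, if_neg (by omega)]

-- sum of a 0/c indicator over an initial segment
lemma pvSum_ite (c t : Int) : ∀ (m : Nat), (∑ i ∈ Finset.range m, if (i : Int) = t then c else 0)
    = if 0 ≤ t ∧ t < (m : Int) then c else 0 := by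
  intro m
  induction m with
  | zero => rw [Finset.range_zero, Finset.sum_empty, if_neg (by omega)]
  | succ m ih =>
    rw [Finset.sum_range_succ, ih]
    split_ifs <;> omega

-- prefix sums of the difference increments give the suffix contribution
lemma pvSum_delta (bookings : List (List Int)) (n : Int)
    (hb : ∀ b ∈ bookings, b.length = 3 ∧ 1 - n ≤ PySem.List.pyGetD b 0 0 ∧
      PySem.List.pyGetD b 0 0 ≤ n ∧ -n ≤ PySem.List.pyGetD b 1 0)
    (j : Nat) (hjn : (j : Int) < n) :
    (∑ i ∈ Finset.range (j + 1), pvSumD bookings n i) = pvSumC bookings n j := by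
  induction bookings with
  | nil => simp [pvSumD, pvSumC]
  | cons b bs ih =>
    obtain ⟨hb3, hbl1, hbl2, hbr⟩ := hb b (List.mem_cons_self ..)
    match b, hb3 with
    | [l, r, c], _ =>
      have e0 : PySem.List.pyGetD [l, r, c] 0 0 = l := by simp [pysem]
      have e1 : PySem.List.pyGetD [l, r, c] 1 0 = r := by simp [pysem]
      have e2 : PySem.List.pyGetD [l, r, c] 2 0 = c := by simp [pysem]
      rw [e0] at hbl1 hbl2
      rw [e1] at hbr
      simp only [pvSumD, pvSumC, List.map_cons, List.sum_cons]
      rw [Finset.sum_add_distrib]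
      have ih' := ih (fun b hm => hb b (List.mem_cons_of_mem _ hm))
      simp only [pvSumD, pvSumC] at ih'
      rw [ih']
      congr 1
      simp only [pvDelta, pvContrib, e0, e1, e2]
      rw [Finset.sum_sub_distrib, pvSum_ite c (pvNorm n (l - 1)) (j + 1)]
      have hP1a : 0 ≤ pvNorm n (l - 1) := by simp only [pvNorm]; split_ifs <;> omega
      by_cases hg : r < n
      · have hsplit : ∀ i ∈ Finset.range (j + 1),
            (if r < n ∧ (i : Int) = pvNorm n r then c else 0) = (if (i : Int) = pvNorm n r then c else 0) := by
          intro i _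
          by_cases h : (i : Int) = pvNorm n r
          · rw [if_pos ⟨hg, h⟩, if_pos h]
          · rw [if_neg (fun hh => h hh.2), if_neg h]
        rw [Finset.sum_congr rfl hsplit, pvSum_ite c (pvNorm n r) (j + 1)]
        have hP2a : 0 ≤ pvNorm n r := by simp only [pvNorm]; split_ifs <;> omega
        split_ifs <;> omega
      · have hsplit : ∀ i ∈ Finset.range (j + 1),
            (if r < n ∧ (i : Int) = pvNorm n r then c else 0) = (0 : Int) := by
          intro i _
          rw [if_neg (fun hh => hg hh.1)]
        rw [Finset.sum_congr rfl hsplit, Finset.sum_const, smul_zero]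
        have hP2 : pvNorm n r = r := by simp only [pvNorm]; rw [if_neg (by omega)]
        rw [hP2, if_neg (show ¬ (r ≤ (j : Int)) by omega)]
        split_ifs <;> omega

-- ===== VERDICT (by name: the statement is the Claim_ definition above) =====
set_option maxHeartbeats 1000000 in
theorem corpFlightBookings_spec : Claim_equal_corpFlightBookings := by
  intro bookings n hdom hpre
  unfold Spec_corpFlightBookings
  unfold Pre_corpFlightBookings at hpre
  have eA : corpFlightBookings bookings n = (PySem.List.pyRange 1 n).foldl (fun diff i =>
      PySem.List.pySetD diff i (PySem.List.pyGetD diff i 0 + PySem.List.pyGetD diff (i - 1) 0))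
      (bookings.foldl (fun diff b =>
        match b with
        | [left, right, inc] =>
          let diff := PySem.List.pySetD diff (left - 1) (PySem.List.pyGetD diff (left - 1) 0 + inc)
          if right - 1 + 1 < n then
            PySem.List.pySetD diff (right - 1 + 1) (PySem.List.pyGetD diff (right - 1 + 1) 0 - inc)
          else diff
        | _ => diff) (List.replicate n.toNat (0 : Int))) := rfl
  have eB : corpFlightBookings_alt bookings n = bookings.foldl (fun result b =>
      PySem.List.slice (PySem.List.slice result none (some (PySem.List.pyGetD b 0 0 - 1)) ++
          (PySem.List.slice result (some (PySem.List.pyGetD b 0 0 - 1)) none).map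
            (fun x => x + PySem.List.pyGetD b 2 0)) none (some (PySem.List.pyGetD b 1 0)) ++
        (PySem.List.slice (PySem.List.slice result none (some (PySem.List.pyGetD b 0 0 - 1)) ++
          (PySem.List.slice result (some (PySem.List.pyGetD b 0 0 - 1)) none).map
            (fun x => x + PySem.List.pyGetD b 2 0)) (some (PySem.List.pyGetD b 1 0)) none).map
          (fun x => x - PySem.List.pyGetD b 2 0)) (List.replicate n.toNat (0 : Int)) := rfl
  by_cases hn : n ≤ 0
  · cases bookings with
    | nil =>
      rw [eA, eB, PySem.List.pyRange_one_eq_nil (by omega)]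
      rfl
    | cons b bs =>
      obtain ⟨hb3, hbl1, hbl2, hbr⟩ := hpre b (List.mem_cons_self ..)
      exact absurd (le_trans hbl1 hbl2) (by linarith)
  · have hn' : ((n.toNat : Nat) : Int) = n := by omega
    have hlenrep : ((List.replicate n.toNat (0 : Int)).length : Int) = n := by
      rw [List.length_replicate]; exact hn'
    obtain ⟨hBL, hBP⟩ := pvB_outer bookings (List.replicate n.toNat 0) n hlenrep hpre
    obtain ⟨hAL1, hAP1⟩ := pvA_phase1 bookings (List.replicate n.toNat 0) n hlenrep hpre
    have hntpos : 0 < n.toNat := by omega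
    obtain ⟨hAL2, hAP2⟩ := pvA_phase2 (fun i => pvSumD bookings n i) (n - 1).toNat 1 n _
      (by omega) le_rfl (by rw [hAL1]; exact hlenrep)
      (by
        intro j hj
        have hj0 : j = 0 := by omega
        subst hj0
        rw [hAP1 0 (by simpa using hntpos), pvGetD_replicate, Finset.sum_range_one]
        ring)
      (by
        intro j hj hjl
        rw [hAP1 j (by rw [← hAL1]; exact hjl), pvGetD_replicate]
        ring)
    rw [eA, eB]
    apply List.ext_getElem
    · rw [hAL2, hAL1, hBL]
    · intro i h1i h2i
      have hi : i < n.toNat := by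
        rw [hAL2, hAL1, List.length_replicate] at h1i
        exact h1i
      have gA : ∀ (xs : List Int) (hx : i < xs.length), xs[i]'hx = PySem.List.pyGetD xs (i : Int) 0 := by
        intro xs hx
        rw [PySem.List.pyGetD_eq_getElem xs 0 (by omega) (by omega)]
        simp
      rw [gA _ h1i, gA _ h2i, hAP2 i (by rw [hAL1, List.length_replicate]; exact hi),
        hBP i (by rw [List.length_replicate]; exact hi), pvGetD_replicate, if_pos (Or.inr (by omega)),
        pvSum_delta bookings n hpre i (by omega)]
      ring
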